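-- pv_equiv track=rewrite | github.com/TLU-HK-RIF23-Kaur/Kaur-Ilves | Programmeerimise alused/praktikum3/Task5.py | find_pauls_place
-- ===== SOURCE A (Python) =====
-- def find_pauls_place(throws, pauls_throw):
--
--     all_throws = throws + [pauls_throw]
--     sorted_throws = sorted(all_throws, reverse=True)
--
--     pauls_place = sorted_throws.index(pauls_throw) + 1
--
--     shared_places = [i + 1 for i, throw in enumerate(sorted_throws) if throw == pauls_throw]
--     if len(shared_places) > 1:
--         shared_places_str = f"Paul jagas  palli viskes {min(shared_places)}. kuni {max(shared_places)}. kohta."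
--     else:
--         shared_places_str = f"Paul sai  palli viskes {pauls_place}. koha."
--
--     return pauls_place, shared_places_str
-- ===== SOURCE B (Python) =====
-- def find_pauls_place(throws, pauls_throw):
--     greater = 0
--     equal = 0
--     for t in throws:
--         if t > pauls_throw:
--             greater += 1
--         elif t == pauls_throw:
--             equal += 1
--     place = greater + 1
--     if equal > 0:
--         s = f"Paul jagas  palli viskes {place}. kuni {greater + equal + 1}. kohta."
--     else:
--         s = f"Paul sai  palli viskes {place}. koha."
--     return place, s
-- ===== Notes on version B (the rewrite author's own statement) =====
-- stated objective: faster
-- what changed: Replaced the sort of throws+[pauls_throw] plus index/enumerate scans by a single pass that counts throws greater than and equal to pauls_throw, from which place and tie range follow directly.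
import Mathlib
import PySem

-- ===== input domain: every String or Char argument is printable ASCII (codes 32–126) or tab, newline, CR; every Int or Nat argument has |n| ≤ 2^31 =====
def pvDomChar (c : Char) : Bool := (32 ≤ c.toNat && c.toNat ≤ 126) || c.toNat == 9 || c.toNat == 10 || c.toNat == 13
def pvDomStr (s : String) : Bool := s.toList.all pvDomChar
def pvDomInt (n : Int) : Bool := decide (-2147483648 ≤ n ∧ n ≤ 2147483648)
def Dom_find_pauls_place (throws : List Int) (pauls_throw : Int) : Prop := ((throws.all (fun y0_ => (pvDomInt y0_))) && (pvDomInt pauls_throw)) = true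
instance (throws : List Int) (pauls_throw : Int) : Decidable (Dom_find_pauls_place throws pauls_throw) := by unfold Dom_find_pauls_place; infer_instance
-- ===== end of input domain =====

-- B replaces A's sort-then-scan (O(n log n)) by one pass counting throws greater than / equal to Paul's; return values proved equal.

-- ===== PORT A =====
def find_pauls_place (throws : List Int) (pauls_throw : Int) : Int × String :=
  let all_throws := throws ++ [pauls_throw]
  let sorted_throws := PySem.List.sorted all_throws (fun x => x) true
  -- list.index: pauls_throw is always a member of sorted_throws, so `none` is unreachable; `.getD 0` totalizes
  let pauls_place : Int := (((PySem.List.index? sorted_throws pauls_throw).getD 0 : Nat) : Int) + 1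
  let shared_places : List Int :=
    ((PySem.List.enumerate sorted_throws 0).filter (fun q => q.2 == pauls_throw)).map (fun q => q.1 + 1)
  let shared_places_str :=
    if shared_places.length > 1 then
      -- min/max of a list the branch guarantees nonempty; `.getD 0` totalizes the unreachable `none`
      "Paul jagas  palli viskes " ++ PySem.Int.toStr ((PySem.List.min? shared_places (fun x => x)).getD 0)
        ++ ". kuni " ++ PySem.Int.toStr ((PySem.List.max? shared_places (fun x => x)).getD 0) ++ ". kohta."
    else
      "Paul sai  palli viskes " ++ PySem.Int.toStr pauls_place ++ ". koha."
  (pauls_place, shared_places_str)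

-- ===== PORT B =====
def find_pauls_place_alt (throws : List Int) (pauls_throw : Int) : Int × String :=
  let ge := throws.foldl
    (fun s t => if t > pauls_throw then (s.1 + 1, s.2) else if t == pauls_throw then (s.1, s.2 + 1) else s)
    ((0 : Int), (0 : Int))
  let place := ge.1 + 1
  if ge.2 > 0 then
    (place, "Paul jagas  palli viskes " ++ PySem.Int.toStr place
      ++ ". kuni " ++ PySem.Int.toStr (ge.1 + ge.2 + 1) ++ ". kohta.")
  else
    (place, "Paul sai  palli viskes " ++ PySem.Int.toStr place ++ ". koha.")

-- ===== PRECONDITION & SPEC =====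
def Spec_find_pauls_place (throws : List Int) (pauls_throw : Int) (out : Int × String) : Prop := out = find_pauls_place_alt throws pauls_throw
instance (throws : List Int) (pauls_throw : Int) (out : Int × String) : Decidable (Spec_find_pauls_place throws pauls_throw out) := by unfold Spec_find_pauls_place; infer_instance

-- ===== CLAIM (what is proved, stated in full; the proofs are below) =====
def Claim_equal_find_pauls_place : Prop := ∀ (throws : List Int) (pauls_throw : Int), Dom_find_pauls_place throws pauls_throw → Spec_find_pauls_place throws pauls_throw (find_pauls_place throws pauls_throw)

-- ===== LEMMAS AND PROOFS =====

-- B's single loop computes (countP (> p), count p).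
lemma bloop (p : Int) (l : List Int) : ∀ (a b : Int),
    l.foldl (fun s t => if p < t then (s.1 + 1, s.2) else if t = p then (s.1, s.2 + 1) else s) (a, b)
    = (a + (l.countP (fun t => decide (p < t)) : Int), b + (l.count p : Int)) := by
  induction l with
  | nil => intro a b; simp
  | cons x l ih =>
    intro a b
    simp only [List.foldl_cons, List.countP_cons, List.count_cons]
    by_cases hx : p < x
    · have hne : ¬ (x = p) := by omega
      simp only [hx, if_pos, hne, if_neg, if_false, ih]
      simp [Prod.ext_iff, hne]
      push_cast
      ring
    · by_cases he : x = p
      · simp only [hx, if_neg, if_false, he, if_pos, if_true, ih]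
        simp [Prod.ext_iff, hx]
        push_cast
        ring
      · simp only [hx, if_neg, if_false, he, ih]
        simp [Prod.ext_iff, hx, he]

-- Every descending list splits as (elements > p) ++ (copies of p) ++ (elements < p).
lemma desc_split (p : Int) : ∀ (L : List Int), L.Pairwise (fun a b => b ≤ a) →
    ∃ A C, L = A ++ List.replicate (L.count p) p ++ C ∧ (∀ x ∈ A, p < x) ∧ (∀ x ∈ C, x < p) := by
  intro L
  induction L with
  | nil => intro _; exact ⟨[], [], by simp⟩
  | cons x L ih =>
    intro hpw
    rcases List.pairwise_cons.mp hpw with ⟨hall, hpwL⟩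
    rcases ih hpwL with ⟨A, C, hEq, hA, hC⟩
    rcases lt_trichotomy p x with hlt | heq | hgt
    · refine ⟨x :: A, C, ?_, ?_, hC⟩
      · have hne : ¬ (x = p) := by omega
        have hc : (x :: L).count p = L.count p := by simp [List.count_cons, hne]
        rw [hc]
        conv_lhs => rw [hEq]
        simp
      · intro y hy
        rcases List.mem_cons.mp hy with rfl | hy
        · exact hlt
        · exact hA y hy
    · -- x = p: the A-part of L must be empty
      have hAnil : A = [] := by
        cases A with
        | nil => rfl
        | cons a A' =>
          have ha : a ∈ L := by rw [hEq]; simp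
          have h1 : a ≤ x := hall a ha
          have h2 : p < a := hA a (by simp)
          omega
      subst heq
      have hc : (p :: L).count p = L.count p + 1 := by simp [List.count_cons]
      refine ⟨[], C, ?_, by simp, hC⟩
      rw [hc, List.nil_append, List.replicate_succ, List.cons_append]
      conv_lhs => rw [hEq, hAnil]
      simp
    · -- x < p: nothing in the list equals or exceeds p
      have hnot : p ∉ (x :: L) := by
        intro hmem
        rcases List.mem_cons.mp hmem with h | hmem
        · omega
        · have := hall p hmem; omega
      have hcount : (x :: L).count p = 0 := List.count_eq_zero.mpr hnot
      refine ⟨[], x :: L, ?_, by simp, ?_⟩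
      · simp [hcount]
      · intro y hy
        rcases List.mem_cons.mp hy with rfl | hy
        · exact hgt
        · have := hall y hy
          omega

-- enumerate of a constant block is an arithmetic ramp
lemma enum_rep (p : Int) (n : Nat) : ∀ (s : Int),
    PySem.List.enumerate (List.replicate n p) s = (List.range n).map (fun (j : Nat) => ((s + (j : Int)), p)) := by
  induction n with
  | zero => intro s; simp [PySem.List.enumerate_nil]
  | succ n ih =>
    intro s
    rw [List.replicate_succ, PySem.List.enumerate_cons, ih (s + 1), List.range_succ_eq_map,
      List.map_cons, List.map_map]
    congr 1
    · simp
    · apply List.map_congr_left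
      intro j _
      simp [Prod.ext_iff]
      push_cast
      ring
-- enumerate-entries over a p-free block are all filtered away
lemma filter_enum_nil (p : Int) (A : List Int) (s : Int) (h : ∀ x ∈ A, x ≠ p) :
    (PySem.List.enumerate A s).filter (fun q => q.2 == p) = [] := by
  rw [List.filter_eq_nil_iff]
  intro q hq
  rcases (PySem.List.mem_enumerate_iff A s q).mp hq with ⟨k, hk, rfl⟩
  simpa using h _ (List.getElem_mem hk)


-- ===== VERDICT (by name: the statement is the Claim_ definition above) =====
theorem find_pauls_place_spec : Claim_equal_find_pauls_place := by
  intro throws p _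
  unfold Spec_find_pauls_place find_pauls_place find_pauls_place_alt
  simp only [gt_iff_lt, beq_iff_eq]
  rw [bloop p throws 0 0]
  simp only [zero_add]
  -- names for the two counters
  set gtc : Nat := throws.countP (fun t => decide (p < t)) with hgtdef
  set eqc : Nat := throws.count p with heqdef
  -- the sorted list and its decomposition
  set L := PySem.List.sorted (throws ++ [p]) (fun x => x) true with hLdef
  have hperm : L.Perm (throws ++ [p]) := PySem.List.sorted_perm (throws ++ [p]) (fun x => x) true
  have hpw : L.Pairwise (fun a b => b ≤ a) := PySem.List.sorted_pairwise_rev (throws ++ [p]) (fun x => x)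
  obtain ⟨A, C, hdec, hA, hC⟩ := desc_split p L hpw
  have hcnt : L.count p = eqc + 1 := by
    rw [hperm.count_eq]
    simp [List.count_append, heqdef]
  rw [hcnt] at hdec
  have hAlen : A.length = gtc := by
    have h1 : L.countP (fun t => decide (p < t)) = gtc := by
      rw [List.Perm.countP_eq _ hperm]
      simp [List.countP_append, hgtdef]
    rw [hdec] at h1
    have hAcp : A.countP (fun t => decide (p < t)) = A.length :=
      List.countP_eq_length.mpr (fun x hx => by simpa using hA x hx)
    have hRcp : (List.replicate (eqc + 1) p).countP (fun t => decide (p < t)) = 0 :=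
      List.countP_eq_zero.mpr (fun x hx => by
        rcases List.eq_of_mem_replicate hx with rfl
        simp)
    have hCcp : C.countP (fun t => decide (p < t)) = 0 :=
      List.countP_eq_zero.mpr (fun x hx => by
        have := hC x hx
        simp
        omega)
    rw [List.countP_append, List.countP_append, hAcp, hRcp, hCcp] at h1
    omega
  -- the .index call
  have hidx : PySem.List.index? L p = some A.length := by
    rw [PySem.List.index?_eq_some_iff]
    refine ⟨A, List.replicate eqc p ++ C, ?_, rfl, fun hp => absurd (hA p hp) (lt_irrefl p)⟩
    rw [hdec, List.replicate_succ]
    simp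
  -- the shared_places comprehension
  have hen : ((PySem.List.enumerate L 0).filter (fun q => q.2 == p)).map (fun q => q.1 + 1)
      = (List.range (eqc + 1)).map (fun (j : Nat) => ((A.length : Int) + (j : Int) + 1)) := by
    rw [hdec, PySem.List.enumerate_append, PySem.List.enumerate_append,
      List.filter_append, List.filter_append]
    rw [filter_enum_nil p A 0 (fun x hx => (hA x hx).ne'),
      filter_enum_nil p C _ (fun x hx => (hC x hx).ne)]
    rw [enum_rep, List.filter_map]
    simp only [List.append_nil, List.nil_append, List.map_map, Function.comp_def, zero_add,
      beq_self_eq_true, List.filter_true]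
  rw [hidx, hen]
  simp only [Option.getD_some, List.length_map, List.length_range, hAlen]
  -- branch on whether Paul shares his place
  rcases Nat.eq_zero_or_pos eqc with hz | hpos
  · rw [hz]
    simp
  · have hgt1 : 1 < eqc + 1 := by omega
    have hb : (0 : Int) < (eqc : Int) := by exact_mod_cast hpos
    simp only [if_pos hgt1, if_pos hb]
    -- min and max of the ramp
    set shared := (List.range (eqc + 1)).map (fun (j : Nat) => ((gtc : Int) + (j : Int) + 1)) with hshared
    have hmem0 : ((gtc : Int) + 1) ∈ shared := by
      rw [hshared]
      refine List.mem_map.mpr ⟨0, List.mem_range.mpr (by omega), by push_cast; ring⟩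
    have hmemtop : ((gtc : Int) + (eqc : Int) + 1) ∈ shared := by
      rw [hshared]
      exact List.mem_map.mpr ⟨eqc, List.mem_range.mpr (by omega), by push_cast; ring⟩
    have hshape : ∀ y ∈ shared, ∃ j : Nat, j ≤ eqc ∧ y = (gtc : Int) + (j : Int) + 1 := by
      intro y hy
      rcases List.mem_map.mp hy with ⟨j, hj, rfl⟩
      exact ⟨j, by simp at hj; omega, rfl⟩
    have hmin : PySem.List.min? shared (fun x => x) = some ((gtc : Int) + 1) := by
      cases h : PySem.List.min? shared (fun x => x) with
      | none =>
        rw [PySem.List.min?_eq_none_iff] at h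
        rw [h] at hmem0
        simp at hmem0
      | some m =>
        have h1 : m ≤ (gtc : Int) + 1 := PySem.List.min?_isMin h _ hmem0
        rcases hshape m (PySem.List.min?_mem h) with ⟨j, hj, rfl⟩
        congr 1
        omega
    have hmax : PySem.List.max? shared (fun x => x) = some ((gtc : Int) + (eqc : Int) + 1) := by
      cases h : PySem.List.max? shared (fun x => x) with
      | none =>
        rw [PySem.List.max?_eq_none_iff] at h
        rw [h] at hmem0
        simp at hmem0
      | some m =>
        have h1 : (gtc : Int) + (eqc : Int) + 1 ≤ m := PySem.List.max?_isMax h _ hmemtop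
        rcases hshape m (PySem.List.max?_mem h) with ⟨j, hj, rfl⟩
        have : (j : Int) ≤ (eqc : Int) := by exact_mod_cast hj
        congr 1
        omega
    rw [hmin, hmax]
    simp
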